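-- pv_equiv track=rewrite | github.com/RazorBackRoar/Libra | src/Libra/video_tools/core/classifier.py | generate_folder_structure
-- ===== SOURCE A (Python) =====
-- from typing import Dict, Tuple, Optional, List
--
-- def generate_folder_structure(mode: str = "MaxVid") -> List[str]:
--     """
--     Generate folder structure based on sorting mode.
--
--     Args:
--         mode: Sorting mode
--             - "VidRes" or "NameKeep": Resolution only
--             - "ProMax": Resolution + Orientation
--             - "MaxVid": Resolution + Orientation + FPS
--             - "ProVid": No subfolders
--
--     Returns:
--         List of folder names to create
--     """
--     resolutions = ["4K", "1080p", "720p", "HD", "SD"]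
--     orientations = ["W", "V"]
--     framerates = ["30", "60"]
--
--     folders = []
--
--     if mode in ("VidRes", "NameKeep"):
--         # Resolution only
--         folders = resolutions.copy()
--
--     elif mode == "ProMax":
--         # Resolution + Orientation
--         for res in resolutions:
--             for orient in orientations:
--                 folders.append(f"{res} {orient}")
--
--     elif mode == "MaxVid":
--         # Resolution + Orientation + FPS
--         for res in resolutions:
--             for orient in orientations:
--                 for fps in framerates:
--                     folders.append(f"{res} {orient} {fps}")
--
--     elif mode == "ProVid":
--         # No subfolders - everything in root
--         folders = []
--
--     return folders
-- ===== SOURCE B (Python) =====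
-- from typing import List
--
-- def generate_folder_structure(mode: str = "MaxVid") -> List[str]:
--     components = {
--         "VidRes": [["4K", "1080p", "720p", "HD", "SD"]],
--         "NameKeep": [["4K", "1080p", "720p", "HD", "SD"]],
--         "ProMax": [["4K", "1080p", "720p", "HD", "SD"], ["W", "V"]],
--         "MaxVid": [["4K", "1080p", "720p", "HD", "SD"], ["W", "V"], ["30", "60"]],
--     }
--     lists = components.get(mode)
--     if lists is None:
--         return []
--     tuples = [[]]
--     for lst in lists:
--         tuples = [t + [x] for t in tuples for x in lst]
--     return [" ".join(t) for t in tuples]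
-- ===== Notes on version B (the rewrite author's own statement) =====
-- stated objective: simpler
-- what changed: Replaces the if/elif chain with three hand-written nested loops by a table mapping each mode to its component lists, a generic fold computing their cartesian product, and a join; unknown modes and ProVid fall out of the table lookup as [].
import Mathlib
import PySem

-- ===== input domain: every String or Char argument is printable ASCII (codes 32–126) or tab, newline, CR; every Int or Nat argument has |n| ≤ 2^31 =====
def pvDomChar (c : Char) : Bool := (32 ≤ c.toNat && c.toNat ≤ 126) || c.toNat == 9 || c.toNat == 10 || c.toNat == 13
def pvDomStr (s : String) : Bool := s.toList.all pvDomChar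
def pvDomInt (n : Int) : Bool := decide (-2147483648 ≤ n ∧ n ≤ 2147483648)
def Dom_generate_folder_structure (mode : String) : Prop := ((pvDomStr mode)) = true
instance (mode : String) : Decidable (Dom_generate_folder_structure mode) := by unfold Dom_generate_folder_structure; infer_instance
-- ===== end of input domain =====

-- B replaces A's if/elif chain with hand-written nested loops by a mode→component-lists table,
-- a generic cartesian-product fold and a join (objective: simpler).

-- ===== PORT A =====
-- f-strings "{res} {orient}" ported exactly as PySem.Str.join " " [res, orient]
def generate_folder_structure (mode : String) : List String :=
  let resolutions : List String := ["4K", "1080p", "720p", "HD", "SD"]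
  let orientations : List String := ["W", "V"]
  let framerates : List String := ["30", "60"]
  let folders : List String := []
  if mode = "VidRes" ∨ mode = "NameKeep" then
    resolutions
  else if mode = "ProMax" then
    resolutions.foldl (fun folders res =>
      orientations.foldl (fun folders orient =>
        folders ++ [PySem.Str.join " " [res, orient]]) folders) folders
  else if mode = "MaxVid" then
    resolutions.foldl (fun folders res =>
      orientations.foldl (fun folders orient =>
        framerates.foldl (fun folders fps =>
          folders ++ [PySem.Str.join " " [res, orient, fps]]) folders) folders) folders
  else if mode = "ProVid" then
    ([] : List String)
  else
    folders

-- ===== PORT B =====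
def generate_folder_structure_alt (mode : String) : List String :=
  let components : PySem.Dict String (List (List String)) := PySem.Dict.ofList
    [("VidRes", [["4K", "1080p", "720p", "HD", "SD"]]),
     ("NameKeep", [["4K", "1080p", "720p", "HD", "SD"]]),
     ("ProMax", [["4K", "1080p", "720p", "HD", "SD"], ["W", "V"]]),
     ("MaxVid", [["4K", "1080p", "720p", "HD", "SD"], ["W", "V"], ["30", "60"]])]
  match components.get? mode with
  | none => []
  | some lists =>
    let tuples := lists.foldl
      (fun tuples lst => tuples.flatMap (fun t => lst.map (fun x => t ++ [x]))) [[]]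
    tuples.map (fun t => PySem.Str.join " " t)

-- ===== PRECONDITION & SPEC =====
def Spec_generate_folder_structure (mode : String) (out : List String) : Prop := out = generate_folder_structure_alt mode
instance (mode : String) (out : List String) : Decidable (Spec_generate_folder_structure mode out) := by unfold Spec_generate_folder_structure; infer_instance

-- ===== CLAIM (what is proved, stated in full; the proofs are below) =====
def Claim_equal_generate_folder_structure : Prop := ∀ (mode : String), Dom_generate_folder_structure mode → Spec_generate_folder_structure mode (generate_folder_structure mode)

-- ===== LEMMAS AND PROOFS =====

-- ===== VERDICT (by name: the statement is the Claim_ definition above) =====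
theorem generate_folder_structure_spec : Claim_equal_generate_folder_structure := by
  intro mode _
  show generate_folder_structure mode = generate_folder_structure_alt mode
  by_cases h1 : mode = "VidRes"
  · subst h1; decide
  by_cases h2 : mode = "NameKeep"
  · subst h2; decide
  by_cases h3 : mode = "ProMax"
  · subst h3; decide
  by_cases h4 : mode = "MaxVid"
  · subst h4; decide
  by_cases h5 : mode = "ProVid"
  · subst h5; decide
  · have h1' : ("VidRes" == mode) = false := by simp; exact fun h => h1 h.symm
    have h2' : ("NameKeep" == mode) = false := by simp; exact fun h => h2 h.symm
    have h3' : ("ProMax" == mode) = false := by simp; exact fun h => h3 h.symm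
    have h4' : ("MaxVid" == mode) = false := by simp; exact fun h => h4 h.symm
    simp [generate_folder_structure, generate_folder_structure_alt,
      PySem.Dict.ofList, PySem.Dict.update, PySem.Dict.empty, PySem.Dict.insert,
      PySem.Dict.contains, PySem.Dict.get?, List.find?,
      h1, h2, h3, h4, h5, h1', h2', h3', h4']
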